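-- pv_equiv track=rewrite | github.com/janek37/advent-of-code | 2021/day04.py | bisect_bingo_last
-- ===== SOURCE A (Python) =====
-- def filter_fives(drawn_numbers, fives):
--     return [(five, board_no) for five, board_no in fives if five.issubset(drawn_numbers)]
--
-- def bisect_bingo_last(drawn_numbers, board_count, fives, start=5, end=None):
--     if end is None:
--         end = len(drawn_numbers)
--     if start == end:
--         return start
--     current = (start + end) // 2
--     filtered_fives = filter_fives(set(drawn_numbers[:current]), fives)
--     win_count = len(set(board_no for five, board_no in filtered_fives))
--     if win_count < board_count:
--         return bisect_bingo_last(drawn_numbers, board_count, fives, current+1, end)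
--     else:
--         return bisect_bingo_last(drawn_numbers, board_count, fives, start, current)
-- ===== SOURCE B (Python) =====
-- def bisect_bingo_last(drawn_numbers, board_count, fives, start=5, end=None):
--     if end is None:
--         end = len(drawn_numbers)
--     # first-occurrence position of each drawn number
--     pos = {}
--     for i, x in enumerate(drawn_numbers):
--         if x not in pos:
--             pos[x] = i
--     # earliest winning draw count per board
--     best = {}
--     for five, board_no in fives:
--         w = 0
--         for x in five:
--             p = pos.get(x)
--             if p is None:
--                 w = None
--                 break
--             if p + 1 > w:
--                 w = p + 1
--         if w is not None and (board_no not in best or w < best[board_no]):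
--             best[board_no] = w
--     if board_count <= 0:
--         return start
--     times = sorted(best.values())
--     if len(times) < board_count:
--         return end
--     t = times[board_count - 1]
--     return min(max(t, start), end)
-- ===== Notes on version B (the rewrite author's own statement) =====
-- stated objective: faster
-- what changed: Replaces the binary search that recomputes all winning fives from scratch at every probe (O(log n) passes, each re-testing every five against a rebuilt prefix set) by a single pass: precompute each number's first draw position once, derive each five's win index (max position + 1), aggregate the earliest win per board, and read the answer off the board_count-th smallest win time clamped to [start, end]; intended as faster (measured ~3x at the largest timing size both finished, with A timing out on some inputs there).
-- outside the precondition, e.g. on bisect_bingo_last([3, 0], 1, [({3}, 1), ({0, 1, 2}, 2), ({3}, 1)], -4, None): A returns -1, B returns 1; on bisect_bingo_last([1], 1, [({1}, 0)], 3, 1): A raises RecursionError, B returns 1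
import Mathlib
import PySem

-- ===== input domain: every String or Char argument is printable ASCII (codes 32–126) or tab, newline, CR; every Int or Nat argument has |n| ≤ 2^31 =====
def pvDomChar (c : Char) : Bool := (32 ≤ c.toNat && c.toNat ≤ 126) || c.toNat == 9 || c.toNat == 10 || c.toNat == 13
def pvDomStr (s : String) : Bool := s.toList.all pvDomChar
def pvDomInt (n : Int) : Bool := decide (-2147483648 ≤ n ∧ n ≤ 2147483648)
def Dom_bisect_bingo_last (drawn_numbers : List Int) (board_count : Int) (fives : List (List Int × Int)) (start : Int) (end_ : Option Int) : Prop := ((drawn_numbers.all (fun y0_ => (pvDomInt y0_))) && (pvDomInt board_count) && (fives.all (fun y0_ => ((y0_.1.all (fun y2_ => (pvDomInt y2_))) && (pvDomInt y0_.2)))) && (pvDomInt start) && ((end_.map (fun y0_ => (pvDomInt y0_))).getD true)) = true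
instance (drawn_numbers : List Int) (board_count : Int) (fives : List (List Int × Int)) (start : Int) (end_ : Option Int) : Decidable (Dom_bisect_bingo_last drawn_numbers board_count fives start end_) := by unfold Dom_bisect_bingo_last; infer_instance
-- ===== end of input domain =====

-- B replaces A's binary search (which rebuilds the winning-five set at every probe) by one
-- pass over the data: first-occurrence positions, per-five win index, earliest win per board,
-- then the board_count-th smallest win time clamped to [start, end].

-- ===== PORT A =====
def pvFilterFives (drawn_set : PySem.Set Int) (fives : List (List Int × Int)) : List (List Int × Int) :=
  fives.filter (fun fb => PySem.Set.issubset fb.1 drawn_set)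

def pvBisectGo (drawn : List Int) (bc : Int) (fives : List (List Int × Int)) :
    Nat → Int → Int → Int
  | 0, start, _ => start
  | fuel + 1, start, e =>
    if start = e then start
    else
      let current := PySem.Int.floordiv (start + e) 2
      let filtered_fives := pvFilterFives (PySem.Set.ofList (PySem.List.slice drawn none (some current))) fives
      let win_count : Int := PySem.Set.len (PySem.Set.ofList (filtered_fives.map (fun fb => fb.2)))
      if win_count < bc then pvBisectGo drawn bc fives fuel (current + 1) e
      else pvBisectGo drawn bc fives fuel start current

def bisect_bingo_last (drawn_numbers : List Int) (board_count : Int) (fives : List (List Int × Int)) (start : Int) (end_ : Option Int) : Int :=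
  let e := end_.getD (drawn_numbers.length : Int)
  -- fuel (e - start).toNat + 1 bounds the recursion depth; inside Pre_ it is never exhausted
  pvBisectGo drawn_numbers board_count fives ((e - start).toNat + 1) start e

-- ===== PORT B =====
def pvPosDict (drawn : List Int) : PySem.Dict Int Int :=
  (PySem.List.enumerate drawn 0).foldl
    (fun pos ix => if PySem.Dict.contains pos ix.2 then pos else PySem.Dict.insert pos ix.2 ix.1)
    PySem.Dict.empty

def pvFiveTime (pos : PySem.Dict Int Int) (five : List Int) : Option Int :=
  five.foldl
    (fun w x =>
      match w with
      | none => none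
      | some t =>
        match PySem.Dict.get? pos x with
        | none => none
        | some p => some (if p + 1 > t then p + 1 else t))
    (some 0)

def pvBestStep (pos : PySem.Dict Int Int) (best : PySem.Dict Int Int) (fb : List Int × Int) : PySem.Dict Int Int :=
  match pvFiveTime pos fb.1 with
  | none => best
  | some w =>
    match PySem.Dict.get? best fb.2 with
    | none => PySem.Dict.insert best fb.2 w
    | some old => if w < old then PySem.Dict.insert best fb.2 w else best

def bisect_bingo_last_alt (drawn_numbers : List Int) (board_count : Int) (fives : List (List Int × Int)) (start : Int) (end_ : Option Int) : Int :=
  let e := end_.getD (drawn_numbers.length : Int)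
  let pos := pvPosDict drawn_numbers
  let best := fives.foldl (pvBestStep pos) PySem.Dict.empty
  if board_count ≤ 0 then start
  else
    let times := PySem.List.sorted (PySem.Dict.values best) (fun v => v) false
    if (times.length : Int) < board_count then e
    else
      let t := PySem.List.pyGetD times (board_count - 1) 0
      min (max t start) e

-- ===== PRECONDITION & SPEC =====
-- Pre_ excludes start > end, on which A recurses forever (RecursionError), and negative start,
-- outside the natural domain of a draw-count bisection, where A's returned value is an artefact
-- of Python's negative-slice wraparound (the bisection predicate is not monotone there).
def Pre_bisect_bingo_last (drawn_numbers : List Int) (board_count : Int) (fives : List (List Int × Int)) (start : Int) (end_ : Option Int) : Prop :=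
  0 ≤ start ∧ start ≤ end_.getD (drawn_numbers.length : Int)
instance (drawn_numbers : List Int) (board_count : Int) (fives : List (List Int × Int)) (start : Int) (end_ : Option Int) : Decidable (Pre_bisect_bingo_last drawn_numbers board_count fives start end_) := by unfold Pre_bisect_bingo_last; infer_instance

def pvWitness_bisect_bingo_last : List Int × Int × (List (List Int × Int)) × Int × Option Int :=
  ([0, 1], 1, [([0], 0)], 0, none)

def Spec_bisect_bingo_last (drawn_numbers : List Int) (board_count : Int) (fives : List (List Int × Int)) (start : Int) (end_ : Option Int) (out : Int) : Prop := out = bisect_bingo_last_alt drawn_numbers board_count fives start end_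
instance (drawn_numbers : List Int) (board_count : Int) (fives : List (List Int × Int)) (start : Int) (end_ : Option Int) (out : Int) : Decidable (Spec_bisect_bingo_last drawn_numbers board_count fives start end_ out) := by unfold Spec_bisect_bingo_last; infer_instance

-- ===== CLAIM (what is proved, stated in full; the proofs are below) =====
def Claim_equal_bisect_bingo_last : Prop := ∀ (drawn_numbers : List Int) (board_count : Int) (fives : List (List Int × Int)) (start : Int) (end_ : Option Int), Dom_bisect_bingo_last drawn_numbers board_count fives start end_ → Pre_bisect_bingo_last drawn_numbers board_count fives start end_ → Spec_bisect_bingo_last drawn_numbers board_count fives start end_ (bisect_bingo_last drawn_numbers board_count fives start end_)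

-- ===== LEMMAS AND PROOFS =====

-- A's probe value: the number of distinct boards having a fully-drawn five within the first c draws
def pvWinCount (drawn : List Int) (fives : List (List Int × Int)) (c : Int) : Int :=
  PySem.Set.len (PySem.Set.ofList ((pvFilterFives (PySem.Set.ofList (PySem.List.slice drawn none (some c))) fives).map (fun fb => fb.2)))

-- B's per-board predicate: board b has won within the first c draws according to dict D
def pvWins (D : PySem.Dict Int Int) (c b : Int) : Prop :=
  ∃ v, PySem.Dict.get? D b = some v ∧ v ≤ c

theorem pvFindIdx_shift (l : List Int) (x y : Int) (hxy : (y == x) = false) (s : Int) :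
    (List.findIdx? (fun z => z == x) (y :: l)).map (fun n => s + (n : Int))
      = (List.findIdx? (fun z => z == x) l).map (fun n => (s + 1) + (n : Int)) := by
  rw [List.findIdx?_cons, hxy]
  cases h : List.findIdx? (fun z => z == x) l
  · simp
  · simp; ring

theorem pvGet?_none_of_not_contains (d : PySem.Dict Int Int) (y : Int)
    (hy : ¬ PySem.Dict.contains d y = true) : d.get? y = none := by
  rw [PySem.Dict.contains_eq_isSome_get?] at hy
  cases h : d.get? y
  · rfl
  · rw [h] at hy; simp at hy

theorem pvPosLoop_get (l : List Int) (s : Int) (d : PySem.Dict Int Int) (x : Int) :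
    PySem.Dict.get?
      ((PySem.List.enumerate l s).foldl
        (fun pos ix => if PySem.Dict.contains pos ix.2 then pos else PySem.Dict.insert pos ix.2 ix.1) d) x
    = ((d.get? x).or ((List.findIdx? (fun y => y == x) l).map (fun n => s + (n : Int)))) := by
  induction l generalizing s d with
  | nil => simp [PySem.List.enumerate_nil]
  | cons y l ih =>
    rw [PySem.List.enumerate_cons, List.foldl_cons]
    by_cases hy : PySem.Dict.contains d y = true
    · simp only [if_pos hy, ih]
      rcases hd : d.get? x with _ | v
      · have hxy : (y == x) = false := by
          by_contra h
          have hyx : y = x := eq_of_beq (a := y) (b := x) (by revert h; cases (y == x) <;> simp)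
          subst hyx
          rw [PySem.Dict.contains_eq_isSome_get?, hd] at hy
          simp at hy
        rw [pvFindIdx_shift l x y hxy s]
      · simp
    · simp only [if_neg hy, ih]
      have hd : d.get? y = none := pvGet?_none_of_not_contains d y hy
      by_cases hxy : x = y
      · subst hxy
        rw [PySem.Dict.get?_insert_self, hd, List.findIdx?_cons]
        simp
      · rw [PySem.Dict.get?_insert_of_ne d s hxy,
            pvFindIdx_shift l x y (by
              rcases h : (y == x) with _ | _
              · rfl
              · exact absurd (eq_of_beq h).symm hxy) s]

theorem pvPos_get (drawn : List Int) (x : Int) :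
    PySem.Dict.get? (pvPosDict drawn) x
      = (List.findIdx? (fun y => y == x) drawn).map (fun n => (n : Int)) := by
  unfold pvPosDict
  rw [pvPosLoop_get, PySem.Dict.get?_empty]
  cases h : List.findIdx? (fun y => y == x) drawn <;> simp

theorem pvMem_take_iff_findIdx (l : List Int) (k : Nat) (x : Int) :
    x ∈ l.take k ↔ ∃ n, List.findIdx? (fun y => y == x) l = some n ∧ n < k := by
  induction l generalizing k with
  | nil => simp
  | cons y l ih =>
    cases k with
    | zero => simp
    | succ k =>
      rw [List.take_succ_cons, List.mem_cons, List.findIdx?_cons]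
      rcases h : (y == x) with _ | _
      · have hne : ¬ x = y := fun e => by subst e; simp at h
        rw [if_neg (by simp), ih]
        constructor
        · rintro (e | ⟨n, hn, hk⟩)
          · exact absurd e hne
          · exact ⟨n + 1, by simp [hn], by omega⟩
        · rintro ⟨m, hm, hk⟩
          rcases hfound : List.findIdx? (fun y => y == x) l with _ | n
          · rw [hfound] at hm; simp at hm
          · rw [hfound] at hm
            simp at hm
            right
            exact ⟨n, rfl, by omega⟩
      · have hx : x = y := (eq_of_beq h).symm
        rw [if_pos (by simp)]
        constructor
        · intro _; exact ⟨0, rfl, by omega⟩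
        · intro _; exact Or.inl hx

theorem pvMem_prefix_iff (drawn : List Int) (c : Int) (hc : 0 ≤ c) (x : Int) :
    x ∈ PySem.List.slice drawn none (some c)
      ↔ ∃ i, PySem.Dict.get? (pvPosDict drawn) x = some i ∧ i + 1 ≤ c := by
  rw [PySem.List.slice_to drawn hc, pvMem_take_iff_findIdx]
  constructor
  · rintro ⟨n, hn, hk⟩
    exact ⟨(n : Int), by rw [pvPos_get, hn]; rfl, by omega⟩
  · rintro ⟨i, hi, hic⟩
    rw [pvPos_get] at hi
    rcases h : List.findIdx? (fun y => y == x) drawn with _ | n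
    · rw [h] at hi; simp at hi
    · rw [h] at hi
      simp at hi
      exact ⟨n, rfl, by omega⟩

theorem pvFiveFold_none (drawn : List Int) (five : List Int) :
    five.foldl
      (fun w x =>
        match w with
        | none => none
        | some t =>
          match PySem.Dict.get? (pvPosDict drawn) x with
          | none => none
          | some p => some (if p + 1 > t then p + 1 else t))
      none = none := by
  induction five with
  | nil => rfl
  | cons x rest ih => simpa using ih

theorem pvFiveFold (drawn : List Int) (c : Int) (hc : 0 ≤ c) (five : List Int) (t : Int) :
    ((∀ x ∈ five, x ∈ PySem.List.slice drawn none (some c)) ∧ t ≤ c) ↔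
      (∃ m,
        five.foldl
          (fun w x =>
            match w with
            | none => none
            | some t =>
              match PySem.Dict.get? (pvPosDict drawn) x with
              | none => none
              | some p => some (if p + 1 > t then p + 1 else t))
          (some t) = some m ∧ m ≤ c) := by
  induction five generalizing t with
  | nil => simp
  | cons x rest ih =>
    rw [List.foldl_cons]
    rcases hp : PySem.Dict.get? (pvPosDict drawn) x with _ | p
    · have hstep :
        (match (some t : Option Int) with
          | none => (none : Option Int)
          | some t =>
            match (none : Option Int) with
            | none => none
            | some p => some (if p + 1 > t then p + 1 else t)) = none := rfl
      rw [hstep, pvFiveFold_none]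
      simp only [List.forall_mem_cons]
      constructor
      · rintro ⟨⟨hx, _⟩, _⟩
        rw [pvMem_prefix_iff drawn c hc] at hx
        rcases hx with ⟨i, hi, _⟩
        rw [hp] at hi
        simp at hi
      · rintro ⟨m, hm, _⟩
        simp at hm
    · have hstep :
        (match (some t : Option Int) with
          | none => (none : Option Int)
          | some t =>
            match (some p : Option Int) with
            | none => none
            | some q => some (if q + 1 > t then q + 1 else t)) = some (if p + 1 > t then p + 1 else t) := rfl
      rw [hstep, ← ih]
      have hx : (x ∈ PySem.List.slice drawn none (some c)) ↔ p + 1 ≤ c := by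
        rw [pvMem_prefix_iff drawn c hc]
        constructor
        · rintro ⟨i, hi, h2⟩
          rw [hp] at hi
          simp only [Option.some.injEq] at hi
          omega
        · intro h
          exact ⟨p, hp, h⟩
      simp only [List.forall_mem_cons, hx]
      constructor
      · rintro ⟨⟨h1, hrest⟩, ht⟩
        exact ⟨hrest, by split_ifs <;> omega⟩
      · rintro ⟨hrest, ht'⟩
        by_cases hb : p + 1 > t
        · rw [if_pos hb] at ht'
          exact ⟨⟨by omega, hrest⟩, by omega⟩
        · rw [if_neg hb] at ht'
          exact ⟨⟨by omega, hrest⟩, by omega⟩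

theorem pvSubset_iff_time (drawn : List Int) (c : Int) (hc : 0 ≤ c) (five : List Int) :
    PySem.Set.issubset five (PySem.Set.ofList (PySem.List.slice drawn none (some c))) = true
      ↔ ∃ m, pvFiveTime (pvPosDict drawn) five = some m ∧ m ≤ c := by
  rw [PySem.Set.issubset_iff]
  unfold pvFiveTime
  rw [← pvFiveFold drawn c hc five 0]
  constructor
  · intro h
    exact ⟨fun x hx => (PySem.Set.mem_ofList _ _).1 (h x hx), hc⟩
  · rintro ⟨h, _⟩
    exact fun x hx => (PySem.Set.mem_ofList _ _).2 (h x hx)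

theorem pvWins_insert_self (D : PySem.Dict Int Int) (k v c : Int) :
    pvWins (PySem.Dict.insert D k v) c k ↔ v ≤ c := by
  unfold pvWins
  rw [PySem.Dict.get?_insert_self]
  constructor
  · rintro ⟨w, hw, hwc⟩
    simp only [Option.some.injEq] at hw
    omega
  · intro h; exact ⟨v, rfl, h⟩

theorem pvWins_insert_ne (D : PySem.Dict Int Int) (k v c b : Int) (hb : b ≠ k) :
    pvWins (PySem.Dict.insert D k v) c b ↔ pvWins D c b := by
  unfold pvWins
  rw [PySem.Dict.get?_insert_of_ne D v hb]

theorem pvBest_inv (drawn : List Int) (c : Int) (hc : 0 ≤ c) :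
    ∀ (fs : List (List Int × Int)) (S : PySem.Set Int) (D : PySem.Dict Int Int),
      D.keys.Nodup → (∀ b, b ∈ S ↔ pvWins D c b) →
      ((∀ b, b ∈ PySem.Set.update S
          ((fs.filter (fun fb => PySem.Set.issubset fb.1 (PySem.Set.ofList (PySem.List.slice drawn none (some c))))).map (fun fb => fb.2))
        ↔ pvWins (fs.foldl (pvBestStep (pvPosDict drawn)) D) c b)
      ∧ (fs.foldl (pvBestStep (pvPosDict drawn)) D).keys.Nodup) := by
  intro fs
  induction fs with
  | nil =>
    intro S D hnd hS
    simpa using ⟨hS, hnd⟩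
  | cons fb fs ih =>
    intro S D hnd hS
    rw [List.foldl_cons, List.filter_cons]
    by_cases hP : PySem.Set.issubset fb.1 (PySem.Set.ofList (PySem.List.slice drawn none (some c))) = true
    · rw [if_pos hP, List.map_cons, PySem.Set.update_cons]
      rcases (pvSubset_iff_time drawn c hc fb.1).1 hP with ⟨m, htime, hm⟩
      have hadd : ∀ (D' : PySem.Dict Int Int), D'.keys.Nodup → pvWins D' c fb.2 →
          (∀ b, b ≠ fb.2 → (pvWins D' c b ↔ pvWins D c b)) →
          ((∀ b, b ∈ PySem.Set.update (PySem.Set.add S fb.2)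
              ((fs.filter (fun fb => PySem.Set.issubset fb.1 (PySem.Set.ofList (PySem.List.slice drawn none (some c))))).map (fun fb => fb.2))
            ↔ pvWins (fs.foldl (pvBestStep (pvPosDict drawn)) D') c b)
          ∧ (fs.foldl (pvBestStep (pvPosDict drawn)) D').keys.Nodup) := by
        intro D' hnd' hwin hsame
        refine ih (PySem.Set.add S fb.2) D' hnd' ?_
        intro b
        rw [PySem.Set.mem_add]
        by_cases hb : b = fb.2
        · subst hb
          constructor
          · intro _; exact hwin
          · intro _; exact Or.inr rfl
        · rw [hsame b hb]
          constructor
          · rintro (h | h)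
            · exact (hS b).1 h
            · exact absurd h hb
          · intro h; exact Or.inl ((hS b).2 h)
      have hstep : pvBestStep (pvPosDict drawn) D fb =
          match PySem.Dict.get? D fb.2 with
          | none => PySem.Dict.insert D fb.2 m
          | some old => if m < old then PySem.Dict.insert D fb.2 m else D := by
        unfold pvBestStep
        rw [htime]
      rcases hD : PySem.Dict.get? D fb.2 with _ | old
      · rw [hstep, hD]
        exact hadd (PySem.Dict.insert D fb.2 m) (PySem.Dict.nodup_keys_insert D fb.2 m hnd)
          ((pvWins_insert_self D fb.2 m c).2 hm)
          (fun b hb => pvWins_insert_ne D fb.2 m c b hb)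
      · rw [hstep, hD]
        have hmatch : (match (some old : Option Int) with
            | none => PySem.Dict.insert D fb.2 m
            | some old => if m < old then PySem.Dict.insert D fb.2 m else D)
            = if m < old then PySem.Dict.insert D fb.2 m else D := rfl
        rw [hmatch]
        by_cases hlt : m < old
        · rw [if_pos hlt]
          exact hadd (PySem.Dict.insert D fb.2 m) (PySem.Dict.nodup_keys_insert D fb.2 m hnd)
            ((pvWins_insert_self D fb.2 m c).2 hm)
            (fun b hb => pvWins_insert_ne D fb.2 m c b hb)
        · rw [if_neg hlt]
          exact hadd D hnd ⟨old, hD, by omega⟩ (fun b _ => Iff.rfl)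
    · rw [if_neg hP]
      have hnot : ∀ m, pvFiveTime (pvPosDict drawn) fb.1 = some m → ¬ m ≤ c := by
        intro m hm hmc
        exact hP ((pvSubset_iff_time drawn c hc fb.1).2 ⟨m, hm, hmc⟩)
      have hkeep : ∀ (D' : PySem.Dict Int Int), D'.keys.Nodup →
          (∀ b, pvWins D' c b ↔ pvWins D c b) →
          ((∀ b, b ∈ PySem.Set.update S
              ((fs.filter (fun fb => PySem.Set.issubset fb.1 (PySem.Set.ofList (PySem.List.slice drawn none (some c))))).map (fun fb => fb.2))
            ↔ pvWins (fs.foldl (pvBestStep (pvPosDict drawn)) D') c b)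
          ∧ (fs.foldl (pvBestStep (pvPosDict drawn)) D').keys.Nodup) := by
        intro D' hnd' hsame
        refine ih S D' hnd' ?_
        intro b
        rw [hsame b]
        exact hS b
      rcases htime : pvFiveTime (pvPosDict drawn) fb.1 with _ | m
      · have hstep : pvBestStep (pvPosDict drawn) D fb = D := by
          unfold pvBestStep; rw [htime]
        rw [hstep]
        exact hkeep D hnd (fun b => Iff.rfl)
      · have hmc : ¬ m ≤ c := hnot m htime
        have hstep : pvBestStep (pvPosDict drawn) D fb =
            match PySem.Dict.get? D fb.2 with
            | none => PySem.Dict.insert D fb.2 m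
            | some old => if m < old then PySem.Dict.insert D fb.2 m else D := by
          unfold pvBestStep; rw [htime]
        rcases hD : PySem.Dict.get? D fb.2 with _ | old
        · rw [hstep, hD]
          refine hkeep (PySem.Dict.insert D fb.2 m) (PySem.Dict.nodup_keys_insert D fb.2 m hnd) ?_
          intro b
          by_cases hb : b = fb.2
          · subst hb
            rw [pvWins_insert_self]
            unfold pvWins
            rw [hD]
            constructor
            · intro h; omega
            · rintro ⟨v, hv, _⟩; simp at hv
          · exact pvWins_insert_ne D fb.2 m c b hb
        · rw [hstep, hD]
          have hmatch : (match (some old : Option Int) with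
              | none => PySem.Dict.insert D fb.2 m
              | some old => if m < old then PySem.Dict.insert D fb.2 m else D)
              = if m < old then PySem.Dict.insert D fb.2 m else D := rfl
          rw [hmatch]
          by_cases hlt : m < old
          · rw [if_pos hlt]
            refine hkeep (PySem.Dict.insert D fb.2 m) (PySem.Dict.nodup_keys_insert D fb.2 m hnd) ?_
            intro b
            by_cases hb : b = fb.2
            · subst hb
              rw [pvWins_insert_self]
              unfold pvWins
              rw [hD]
              constructor
              · intro h; omega
              · rintro ⟨v, hv, hvc⟩
                simp only [Option.some.injEq] at hv
                omega
            · exact pvWins_insert_ne D fb.2 m c b hb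
          · rw [if_neg hlt]
            exact hkeep D hnd (fun b => Iff.rfl)

theorem pvWinCount_eq (drawn : List Int) (fives : List (List Int × Int)) (c : Int) (hc : 0 ≤ c) :
    pvWinCount drawn fives c
      = (((PySem.Dict.values (fives.foldl (pvBestStep (pvPosDict drawn)) PySem.Dict.empty)).filter
          (fun v => decide (v ≤ c))).length : Int) := by
  obtain ⟨hmem, hnd⟩ := pvBest_inv drawn c hc fives PySem.Set.empty PySem.Dict.empty
    PySem.Dict.nodup_keys_empty
    (by
      intro b
      unfold pvWins
      rw [PySem.Dict.get?_empty]
      simp [PySem.Set.empty])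
  set D := fives.foldl (pvBestStep (pvPosDict drawn)) PySem.Dict.empty with hDdef
  rw [show (PySem.Set.empty : PySem.Set Int) = ([] : List Int) from rfl, PySem.Set.update_nil_left] at hmem
  unfold pvWinCount pvFilterFives
  have hlen : PySem.Set.len
      (PySem.Set.ofList ((fives.filter (fun fb => PySem.Set.issubset fb.1
          (PySem.Set.ofList (PySem.List.slice drawn none (some c))))).map (fun fb => fb.2)))
      = ((PySem.Set.ofList ((fives.filter (fun fb => PySem.Set.issubset fb.1
          (PySem.Set.ofList (PySem.List.slice drawn none (some c))))).map (fun fb => fb.2))).length : Int) := by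
    rfl
  rw [hlen]
  congr 1
  set S := PySem.Set.ofList ((fives.filter (fun fb => PySem.Set.issubset fb.1
      (PySem.Set.ofList (PySem.List.slice drawn none (some c))))).map (fun fb => fb.2)) with hSdef
  set L := (D.items.filter (fun p => decide (p.2 ≤ c))).map (fun p => p.1) with hLdef
  have hsub : L.Sublist (D.items.map (fun p => p.1)) := by
    rw [hLdef]
    exact List.Sublist.map _ (List.filter_sublist)
  have hLnd : L.Nodup := List.Nodup.sublist hsub (by simpa [PySem.Dict.keys] using hnd)
  have hperm : S.Perm L := by
    rw [List.perm_ext_iff_of_nodup (PySem.Set.nodup_ofList _) hLnd]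
    intro b
    rw [hmem b]
    unfold pvWins
    constructor
    · rintro ⟨v, hv, hvc⟩
      rw [hLdef, List.mem_map]
      exact ⟨(b, v), (List.mem_filter).2 ⟨(PySem.Dict.get?_eq_some_iff_mem_items D b v hnd).1 hv, by simpa using hvc⟩, rfl⟩
    · intro hb
      rw [hLdef, List.mem_map] at hb
      rcases hb with ⟨p, hp, hpb⟩
      rcases List.mem_filter.1 hp with ⟨hpi, hpc⟩
      refine ⟨p.2, ?_, by simpa using hpc⟩
      rw [PySem.Dict.get?_eq_some_iff_mem_items D b p.2 hnd]
      have : p = (b, p.2) := by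
        rcases p with ⟨p1, p2⟩
        simp at hpb
        simp [hpb]
      rw [← this]
      exact hpi
  rw [hperm.length_eq, hLdef, List.length_map]
  have hvals : PySem.Dict.values D = D.items.map (fun p => p.2) := rfl
  rw [hvals, List.filter_map, List.length_map]
  rfl

theorem pvWinCount_nonneg (drawn : List Int) (fives : List (List Int × Int)) (c : Int) :
    0 ≤ pvWinCount drawn fives c := by
  unfold pvWinCount
  exact Int.natCast_nonneg _

theorem pvCountLe_sorted (l : List Int) (hl : l.Pairwise (fun a b : Int => a ≤ b)) (k : Nat)
    (hk : k < l.length) (c : Int) :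
    (k + 1 ≤ (l.filter (fun v => decide (v ≤ c))).length) ↔ l[k] ≤ c := by
  induction l generalizing k with
  | nil => simp at hk
  | cons a l ih =>
    rcases List.pairwise_cons.1 hl with ⟨ha, hl'⟩
    by_cases hac : a ≤ c
    · rw [List.filter_cons_of_pos (by simpa using hac)]
      cases k with
      | zero => simpa using hac
      | succ k =>
        rw [List.length_cons]
        have := ih hl' k (by simpa using hk)
        constructor
        · intro h
          have : k + 1 ≤ (l.filter (fun v => decide (v ≤ c))).length := by omega
          simpa using (ih hl' k (by simpa using hk)).1 this
        · intro h
          have := (ih hl' k (by simpa using hk)).2 (by simpa using h)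
          omega
    · rw [List.filter_cons_of_neg (by simpa using hac)]
      have hnil : l.filter (fun v => decide (v ≤ c)) = [] := by
        rw [List.filter_eq_nil_iff]
        intro v hv
        simp only [decide_eq_true_eq]
        have := ha v hv
        omega
      rw [hnil]
      simp only [List.length_nil]
      constructor
      · intro h; omega
      · intro h
        exfalso
        cases k with
        | zero => exact hac (by simpa using h)
        | succ k =>
          have hkl : k < l.length := by simpa using hk
          have hmem : l[k] ∈ l := List.getElem_mem hkl
          have h2 := ha _ hmem
          have h3 : (a :: l)[k + 1] = l[k] := by simp
          omega

theorem pvGo_eq (drawn : List Int) (bc : Int) (fives : List (List Int × Int)) (t : Int) :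
    ∀ (fuel : Nat) (s e : Int), s ≤ e → (e - s).toNat < fuel →
      (∀ c, s ≤ c → c < e → (pvWinCount drawn fives c < bc ↔ c < t)) →
      pvBisectGo drawn bc fives fuel s e = min (max t s) e := by
  intro fuel
  induction fuel with
  | zero => intro s e _ h _; omega
  | succ fuel ih =>
    intro s e hse hfuel H
    by_cases heq : s = e
    · subst heq
      rw [show pvBisectGo drawn bc fives (fuel + 1) s s = s by simp [pvBisectGo]]
      omega
    · have hlt : s < e := lt_of_le_of_ne hse heq
      have hmid := PySem.Int.floordiv_two_mid_bounds (le_of_lt hlt)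
      set current := PySem.Int.floordiv (s + e) 2 with hcur
      have hcure : current < e := by
        rw [hcur, PySem.Int.floordiv_lt_iff_lt_mul (by omega)]
        omega
      have hstep : pvBisectGo drawn bc fives (fuel + 1) s e =
          if pvWinCount drawn fives current < bc then pvBisectGo drawn bc fives fuel (current + 1) e
          else pvBisectGo drawn bc fives fuel s current := by
        simp only [pvBisectGo, if_neg heq]
        rfl
      rw [hstep]
      by_cases hwin : pvWinCount drawn fives current < bc
      · rw [if_pos hwin]
        have hct : current < t := (H current hmid.1 hcure).1 hwin
        rw [ih (current + 1) e (by omega) (by omega)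
          (fun c h1 h2 => H c (by omega) h2)]
        omega
      · rw [if_neg hwin]
        have hct : t ≤ current := by
          have := (H current hmid.1 hcure).2
          omega
        rw [ih s current (by omega) (by omega)
          (fun c h1 h2 => H c h1 (by omega))]
        omega

-- ===== VERDICT (by name: the statement is the Claim_ definition above) =====
theorem bisect_bingo_last_spec : Claim_equal_bisect_bingo_last := by
  intro drawn bc fives start end_ hdom hpre
  unfold Spec_bisect_bingo_last
  obtain ⟨hstart, hse⟩ := hpre
  simp only [bisect_bingo_last, bisect_bingo_last_alt]
  set e := end_.getD (drawn.length : Int) with he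
  set best := fives.foldl (pvBestStep (pvPosDict drawn)) PySem.Dict.empty with hbest
  by_cases hbc : bc ≤ 0
  · rw [if_pos hbc]
    rw [pvGo_eq drawn bc fives start ((e - start).toNat + 1) start e hse (by omega)
      (by
        intro c h1 h2
        have := pvWinCount_nonneg drawn fives c
        constructor
        · intro h; omega
        · intro h; omega)]
    omega
  · rw [if_neg hbc]
    set times := PySem.List.sorted (PySem.Dict.values best) (fun v => v) false with htimes
    have hcount : ∀ c, 0 ≤ c →
        pvWinCount drawn fives c = ((times.filter (fun v => decide (v ≤ c))).length : Int) := by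
      intro c hc
      rw [pvWinCount_eq drawn fives c hc, ← hbest]
      congr 1
      exact (List.Perm.filter _ (PySem.List.sorted_perm (PySem.Dict.values best) (fun v => v) false)).length_eq.symm
    by_cases hlen : (times.length : Int) < bc
    · rw [if_pos hlen]
      rw [pvGo_eq drawn bc fives e ((e - start).toNat + 1) start e hse (by omega)
        (by
          intro c h1 h2
          have hc0 : 0 ≤ c := by omega
          have hcnt := hcount c hc0
          have hle : (times.filter (fun v => decide (v ≤ c))).length ≤ times.length :=
            List.length_filter_le _ _
          constructor
          · intro _; omega
          · intro _; omega)]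
      omega
    · rw [if_neg hlen]
      have hk : (bc - 1).toNat < times.length := by omega
      have ht : PySem.List.pyGetD times (bc - 1) 0 = times[(bc - 1).toNat] := by
        conv_lhs => rw [show (bc - 1 : Int) = (((bc - 1).toNat : Nat) : Int) by omega]
        rw [PySem.List.pyGetD_natCast]
        exact List.getD_eq_getElem times 0 hk
      have hpw : times.Pairwise (fun a b : Int => a ≤ b) := by
        simpa using PySem.List.sorted_pairwise (PySem.Dict.values best) (fun v => v)
      rw [pvGo_eq drawn bc fives (times[(bc - 1).toNat]) ((e - start).toNat + 1) start e hse (by omega)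
        (by
          intro c h1 h2
          have hc0 : 0 ≤ c := by omega
          have hcnt := hcount c hc0
          have hiff := pvCountLe_sorted times hpw ((bc - 1).toNat) hk c
          constructor
          · intro h
            by_contra hcon
            have hle : times[(bc - 1).toNat] ≤ c := by omega
            have := hiff.2 hle
            omega
          · intro h
            have hnle : ¬ ((bc - 1).toNat + 1 ≤ (times.filter (fun v => decide (v ≤ c))).length) := by
              intro hle
              have := hiff.1 hle
              omega
            omega)]
      rw [ht]
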